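-- pv_equiv track=rewrite | github.com/thepollitosd/thepollitosd.github.io | chess/train_chess_nn.py | mirror_fen
-- ===== SOURCE A (Python) =====
-- from dataclasses import dataclass
--
-- @dataclass
-- class Position:
--     board: list[str | None]
--     turn: str
--     castling: str
--     ep: str
--
-- def file_of(index: int) -> int:
--     return index % 8
--
-- def rank_of(index: int) -> int:
--     return index // 8
--
-- def index_of(file_idx: int, rank_idx: int) -> int:
--     return rank_idx * 8 + file_idx
--
-- def parse_fen(fen: str) -> Position:
--     parts = fen.split()
--     if len(parts) < 4:
--         raise ValueError(f"Invalid FEN: {fen}")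
--     board = [None] * 64
--     rank_idx = 7
--     file_idx = 0
--     for ch in parts[0]:
--         if ch == "/":
--             rank_idx -= 1
--             file_idx = 0
--             continue
--         if ch.isdigit():
--             file_idx += int(ch)
--             continue
--         board[index_of(file_idx, rank_idx)] = ch
--         file_idx += 1
--     return Position(board=board, turn=parts[1], castling=parts[2], ep=parts[3])
--
-- def mirror_fen(fen: str) -> str:
--     pos = parse_fen(fen)
--     mirrored = [None] * 64
--     for idx, piece in enumerate(pos.board):
--         if piece is None:
--             continue
--         file_idx = file_of(idx)
--         rank_idx = rank_of(idx)
--         new_idx = index_of(7 - file_idx, 7 - rank_idx)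
--         mirrored[new_idx] = piece.swapcase()
--     rows = []
--     for rank_idx in range(7, -1, -1):
--         run = 0
--         row = []
--         for file_idx in range(8):
--             piece = mirrored[index_of(file_idx, rank_idx)]
--             if piece is None:
--                 run += 1
--             else:
--                 if run:
--                     row.append(str(run))
--                     run = 0
--                 row.append(piece)
--         if run:
--             row.append(str(run))
--         rows.append("".join(row))
--     turn = "b" if pos.turn == "w" else "w"
--     castling = pos.castling.translate(str.maketrans("KQkq", "kqKQ"))
--     if not castling:
--         castling = "-"
--     ep = "-"
--     return "/".join(rows) + f" {turn} {castling} {ep} 0 1"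
-- ===== SOURCE B (Python) =====
-- def mirror_fen(fen: str) -> str:
--     parts = fen.split()
--     if len(parts) < 4:
--         raise ValueError(f"Invalid FEN: {fen}")
--     expanded = "".join(
--         "".join(" " * int(ch) if ch.isdigit() else ch for ch in rank).ljust(8)
--         for rank in parts[0].split("/")
--     ).ljust(64)
--     flipped = expanded[::-1].swapcase()
--     rows = []
--     for i in range(0, 64, 8):
--         row = ""
--         run = 0
--         for ch in flipped[i:i + 8]:
--             if ch == " ":
--                 run += 1
--             else:
--                 if run:
--                     row += str(run)
--                     run = 0
--                 row += ch
--         if run: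
--             row += str(run)
--         rows.append(row)
--     turn = "b" if parts[1] == "w" else "w"
--     castling = parts[2].translate(str.maketrans("KQkq", "kqKQ")) or "-"
--     return "/".join(rows) + f" {turn} {castling} - 0 1"
-- ===== Notes on version B (the rewrite author's own statement) =====
-- stated objective: simpler
-- what changed: B never builds the two 64-cell arrays: it expands the board field of the FEN into one 64-character string (digits become runs of spaces, each rank right-padded with spaces to 8), performs the 180-degree flip as a single string reversal plus swapcase, and run-length-compresses eight 8-character slices back into FEN ranks.
import Mathlib
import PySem

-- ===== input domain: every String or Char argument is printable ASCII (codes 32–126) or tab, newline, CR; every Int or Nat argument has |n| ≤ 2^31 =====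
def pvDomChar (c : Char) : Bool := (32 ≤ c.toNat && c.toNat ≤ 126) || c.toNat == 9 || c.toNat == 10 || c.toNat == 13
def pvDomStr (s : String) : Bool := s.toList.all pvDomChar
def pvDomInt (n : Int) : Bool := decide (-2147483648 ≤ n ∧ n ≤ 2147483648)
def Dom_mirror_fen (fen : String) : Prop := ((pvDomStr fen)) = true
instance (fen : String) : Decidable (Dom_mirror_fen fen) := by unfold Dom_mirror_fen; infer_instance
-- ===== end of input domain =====

-- B replaces A's two 64-cell arrays by direct string work: expand the board field to one
-- 64-char string, flip it by a single reversal + swapcase, and re-compress 8-char slices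
-- (objective: simpler decomposition; same asymptotic cost).

-- ===== PORT A =====
-- str.swapcase on one char (exact on ASCII, the stated domain); used by both Pythons
def pvSwapChar (c : Char) : Char :=
  if PySem.Chars.isupper c then PySem.Chars.lowerChar c
  else if PySem.Chars.islower c then PySem.Chars.upperChar c
  else c

-- str.translate(str.maketrans("KQkq", "kqKQ")) on one char; used by both Pythons
def pvTransChar (c : Char) : Char :=
  if c = 'K' then 'k' else if c = 'Q' then 'q'
  else if c = 'k' then 'K' else if c = 'q' then 'Q' else c

-- the for-ch loop of parse_fen (board, rank_idx, file_idx state)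
def pvParseLoop : List Char → List (Option Char) → Int → Int → List (Option Char)
  | [], board, _, _ => board
  | c :: rest, board, rankIdx, fileIdx =>
    if c = '/' then pvParseLoop rest board (rankIdx - 1) 0
    else if PySem.Chars.isdigit c then
      pvParseLoop rest board rankIdx (fileIdx + ((c.toNat : Int) - 48))
    else pvParseLoop rest (PySem.List.pySetD board (rankIdx * 8 + fileIdx) (some c)) rankIdx (fileIdx + 1)

-- body of 'for idx, piece in enumerate(pos.board)'
def pvMirrorStep (m : List (Option Char)) (p : Int × Option Char) : List (Option Char) :=
  match p.2 with
  | none => m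
  | some piece =>
    let fileIdx := PySem.Int.mod p.1 8
    let rankIdx := PySem.Int.floordiv p.1 8
    PySem.List.pySetD m ((7 - rankIdx) * 8 + (7 - fileIdx)) (some (pvSwapChar piece))

-- body of the file_idx loop (run/row state)
def pvStepO (st : Int × List Char) (piece : Option Char) : Int × List Char :=
  match piece with
  | none => (st.1 + 1, st.2)
  | some p => (0, st.2 ++ (if st.1 ≠ 0 then PySem.Int.toChars st.1 else []) ++ [p])

-- one iteration of the rank_idx loop: run/row over file_idx in range(8), then ''.join
def pvRankRLE (mirrored : List (Option Char)) (rankIdx : Int) : String :=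
  let st := (PySem.List.pyRange 0 8 1).foldl (fun st fileIdx =>
    pvStepO st (PySem.List.pyGetD mirrored (rankIdx * 8 + fileIdx) none)) ((0 : Int), ([] : List Char))
  String.ofList (st.2 ++ (if st.1 ≠ 0 then PySem.Int.toChars st.1 else []))


def mirror_fen (fen : String) : String :=
  let parts := PySem.Str.split₀ fen
  if parts.length < 4 then "" else          -- raise ValueError: excluded by Pre_
  let board := pvParseLoop (PySem.List.pyGetD parts 0 "").toList (List.replicate 64 none) 7 0
  let mirrored := (PySem.List.enumerate board 0).foldl pvMirrorStep (List.replicate 64 none)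
  let rows := (PySem.List.pyRange 7 (-1) (-1)).foldl (fun rows r => rows ++ [pvRankRLE mirrored r]) []
  let turn := if PySem.List.pyGetD parts 1 "" = "w" then "b" else "w"
  let castling := String.ofList ((PySem.List.pyGetD parts 2 "").toList.map pvTransChar)
  let castling := if castling.toList.isEmpty then "-" else castling
  PySem.Str.join "/" rows ++ " " ++ turn ++ " " ++ castling ++ " - 0 1"

-- ===== PORT B =====
-- '" " * int(ch) if ch.isdigit() else ch' joined over one rank
def pvExpandRank (rank : List Char) : List Char :=
  rank.flatMap (fun ch => if PySem.Chars.isdigit ch then List.replicate (ch.toNat - 48) ' ' else [ch])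

-- str.ljust(w) with spaces (exact)
def pvLjust (cs : List Char) (w : Nat) : List Char := cs ++ List.replicate (w - cs.length) ' '

-- body of the run/row loop over one 8-char slice of `flipped`
def pvStepC (st : Int × List Char) (ch : Char) : Int × List Char :=
  if ch = ' ' then (st.1 + 1, st.2)
  else ((0 : Int), st.2 ++ (if st.1 ≠ 0 then PySem.Int.toChars st.1 else []) ++ [ch])

-- the run/row loop over one 8-char slice, then the row string
def pvChunkRLE (chunk : List Char) : String :=
  let st := chunk.foldl pvStepC ((0 : Int), ([] : List Char))
  String.ofList (st.2 ++ (if st.1 ≠ 0 then PySem.Int.toChars st.1 else []))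


def mirror_fen_alt (fen : String) : String :=
  let parts := PySem.Str.split₀ fen
  if parts.length < 4 then "" else          -- raise ValueError: excluded by Pre_
  let ranks := PySem.Chars.splitOn (PySem.List.pyGetD parts 0 "").toList ['/']
  let expanded := pvLjust (ranks.flatMap (fun r => pvLjust (pvExpandRank r) 8)) 64
  let flipped := expanded.reverse.map pvSwapChar
  let rows := (PySem.List.pyRange 0 64 8).foldl (fun rows i =>
    rows ++ [pvChunkRLE (PySem.List.slice flipped (some i) (some (i + 8)))]) []
  let turn := if PySem.List.pyGetD parts 1 "" = "w" then "b" else "w"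
  let castling := String.ofList ((PySem.List.pyGetD parts 2 "").toList.map pvTransChar)
  let castling := if castling.toList.isEmpty then "-" else castling
  PySem.Str.join "/" rows ++ " " ++ turn ++ " " ++ castling ++ " - 0 1"

-- ===== PRECONDITION & SPEC =====
-- number of board files a rank string occupies
def pvWidth (rank : List Char) : Nat :=
  (rank.map (fun c => if PySem.Chars.isdigit c then c.toNat - 48 else 1)).sum


-- Pre_ excludes FENs with fewer than 4 fields (A raises ValueError) and malformed board
-- fields (more than 8 ranks, or a rank wider than 8 files): there A either raises
-- IndexError or still returns through Python's negative-index wraparound into its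
-- 64-cell array, an accident of that representation.
def Pre_mirror_fen (fen : String) : Prop :=
  let parts := PySem.Str.split₀ fen
  4 ≤ parts.length ∧
  (let ranks := PySem.Chars.splitOn (PySem.List.pyGetD parts 0 "").toList ['/']
   ranks.length ≤ 8 ∧ ∀ r ∈ ranks, pvWidth r ≤ 8)
instance (fen : String) : Decidable (Pre_mirror_fen fen) := by unfold Pre_mirror_fen; infer_instance

def pvWitness_mirror_fen : String := "rnbqkbnr/pppppppp/8/8/8/8/PPPPPPPP/RNBQKBNR w KQkq - 0 1"

def Spec_mirror_fen (fen : String) (out : String) : Prop := out = mirror_fen_alt fen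
instance (fen : String) (out : String) : Decidable (Spec_mirror_fen fen out) := by unfold Spec_mirror_fen; infer_instance

-- ===== CLAIM (what is proved, stated in full; the proofs are below) =====
def Claim_equal_mirror_fen : Prop :=
  ∀ (fen : String), Dom_mirror_fen fen → Pre_mirror_fen fen → Spec_mirror_fen fen (mirror_fen fen)

-- ===== LEMMAS AND PROOFS =====

theorem pv_split0_go_chars : ∀ (l cur : List Char) (acc : List (List Char))
    (f : List Char) (c : Char), f ∈ PySem.Chars.split₀.go l cur acc → c ∈ f →
    ((c ∈ l ∧ PySem.Chars.isspace c = false) ∨ c ∈ cur ∨ ∃ g ∈ acc, c ∈ g) := by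
  intro l
  induction l with
  | nil =>
    intro cur acc f c hf hc
    simp only [PySem.Chars.split₀.go] at hf
    split at hf
    · right; right; exact ⟨f, by simpa using hf, hc⟩
    · simp only [List.reverse_cons, List.mem_append, List.mem_reverse, List.mem_singleton] at hf
      rcases hf with h | h
      · right; right; exact ⟨f, h, hc⟩
      · subst h; right; left; simpa using hc
  | cons a rest ih =>
    intro cur acc f c hf hc
    simp only [PySem.Chars.split₀.go] at hf
    split at hf
    · split at hf
      · rcases ih _ _ _ _ hf hc with ⟨h1, h2⟩ | h | ⟨g, hg, hcg⟩
        · exact Or.inl ⟨List.mem_cons_of_mem _ h1, h2⟩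
        · simp at h
        · exact Or.inr (Or.inr ⟨g, hg, hcg⟩)
      · rcases ih _ _ _ _ hf hc with ⟨h1, h2⟩ | h | ⟨g, hg, hcg⟩
        · exact Or.inl ⟨List.mem_cons_of_mem _ h1, h2⟩
        · simp at h
        · rcases List.mem_cons.1 hg with rfl | hg'
          · exact Or.inr (Or.inl (by simpa using hcg))
          · exact Or.inr (Or.inr ⟨g, hg', hcg⟩)
    · rcases ih _ _ _ _ hf hc with ⟨h1, h2⟩ | h | ⟨g, hg, hcg⟩
      · exact Or.inl ⟨List.mem_cons_of_mem _ h1, h2⟩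
      · rcases List.mem_cons.1 h with rfl | h'
        · rename_i hsp; exact Or.inl ⟨List.mem_cons_self .., by simpa using hsp⟩
        · exact Or.inr (Or.inl h')
      · exact Or.inr (Or.inr ⟨g, hg, hcg⟩)

theorem pv_split0_chars {s : List Char} {f : List Char} {c : Char}
    (hf : f ∈ PySem.Chars.split₀ s) (hc : c ∈ f) :
    c ∈ s ∧ PySem.Chars.isspace c = false := by
  have := pv_split0_go_chars s [] [] f c (by simpa [PySem.Chars.split₀] using hf) hc
  simpa using this

def pvSplitSlash : List Char → List (List Char)
  | [] => [[]]
  | c :: rest =>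
    if c = '/' then [] :: pvSplitSlash rest
    else (c :: (pvSplitSlash rest).headI) :: (pvSplitSlash rest).tail

theorem pvSplitSlash_ne_nil (s : List Char) : pvSplitSlash s ≠ [] := by
  cases s with
  | nil => simp [pvSplitSlash]
  | cons c rest => by_cases h : c = '/' <;> simp [pvSplitSlash, h]

theorem pv_splitOn_go : ∀ (fuel : Nat) (l cur : List Char) (acc : List (List Char)),
    l.length < fuel →
    PySem.Chars.splitOn.go ['/'] fuel l cur acc =
      acc.reverse ++ (cur.reverse ++ (pvSplitSlash l).headI) :: (pvSplitSlash l).tail := by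
  intro fuel
  induction fuel with
  | zero => omega
  | succ n ih =>
    intro l cur acc hl
    cases l with
    | nil => rw [PySem.Chars.splitOn.go.eq_def]; simp [pvSplitSlash]
    | cons c rest =>
      by_cases h : c = '/'
      · subst h
        rw [show PySem.Chars.splitOn.go ['/'] (n+1) ('/' :: rest) cur acc
              = PySem.Chars.splitOn.go ['/'] n rest [] (cur.reverse :: acc) by
            rw [PySem.Chars.splitOn.go.eq_def]; simp [List.isPrefixOf]]
        rw [ih rest [] (cur.reverse :: acc) (by simpa using hl)]
        rcases hs : pvSplitSlash rest with _ | ⟨h0, t0⟩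
        · exact absurd hs (pvSplitSlash_ne_nil rest)
        · simp [pvSplitSlash, hs]
      · have hbe : ('/' == c) = false := beq_eq_false_iff_ne.2 (Ne.symm h)
        rw [show PySem.Chars.splitOn.go ['/'] (n+1) (c :: rest) cur acc
              = PySem.Chars.splitOn.go ['/'] n rest (c :: cur) acc by
            rw [PySem.Chars.splitOn.go.eq_def]; simp [List.isPrefixOf, hbe]]
        rw [ih rest (c :: cur) acc (by simpa using hl)]
        simp [pvSplitSlash, h]

theorem pv_splitOn_eq (s : List Char) :
    PySem.Chars.splitOn s ['/'] = pvSplitSlash s := by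
  rw [PySem.Chars.splitOn, pv_splitOn_go (s.length + 1) s [] [] (by omega)]
  rcases hs : pvSplitSlash s with _ | ⟨h0, t0⟩
  · exact absurd hs (pvSplitSlash_ne_nil s)
  · simp

def pvJoinSlash : List (List Char) → List Char
  | [] => []
  | [r] => r
  | r :: rs => r ++ '/' :: pvJoinSlash rs

theorem pvJoinSlash_cons_of_ne_nil (l : List (List Char)) (hl : l ≠ []) (r : List Char) :
    pvJoinSlash (r :: l) = r ++ '/' :: pvJoinSlash l := by
  cases l with
  | nil => exact absurd rfl hl
  | cons a t => rfl

theorem pv_joinSlash_splitSlash (s : List Char) :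
    pvJoinSlash (pvSplitSlash s) = s := by
  induction s with
  | nil => simp [pvSplitSlash, pvJoinSlash]
  | cons c rest ih =>
    by_cases h : c = '/'
    · subst h
      rw [show pvSplitSlash ('/' :: rest) = [] :: pvSplitSlash rest from by simp [pvSplitSlash],
        pvJoinSlash_cons_of_ne_nil _ (pvSplitSlash_ne_nil rest), ih]
      rfl
    · rcases hs : pvSplitSlash rest with _ | ⟨h0, t0⟩
      · exact absurd hs (pvSplitSlash_ne_nil rest)
      · have step : pvSplitSlash (c :: rest) = (c :: h0) :: t0 := by simp [pvSplitSlash, h, hs]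
        rw [step]
        have : pvJoinSlash ((c :: h0) :: t0) = c :: pvJoinSlash (h0 :: t0) := by
          cases t0 <;> rfl
        rw [this, ← hs, ih]

theorem pv_splitSlash_chars : ∀ (s : List Char) (f : List Char) (c : Char),
    f ∈ pvSplitSlash s → c ∈ f → c ∈ s ∧ c ≠ '/' := by
  intro s
  induction s with
  | nil => intro f c hf hc; simp [pvSplitSlash] at hf; subst hf; simp at hc
  | cons a rest ih =>
    intro f c hf hc
    obtain ⟨h0, t0, hh⟩ := List.exists_cons_of_ne_nil (pvSplitSlash_ne_nil rest)
    by_cases h : a = '/'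
    · subst h
      rw [show pvSplitSlash ('/' :: rest) = [] :: pvSplitSlash rest from by
        simp [pvSplitSlash]] at hf
      rcases List.mem_cons.1 hf with rfl | hf
      · simp at hc
      · have := ih f c hf hc; exact ⟨List.mem_cons_of_mem _ this.1, this.2⟩
    · simp only [pvSplitSlash, if_neg h, hh, List.headI, List.tail, List.mem_cons] at hf
      rcases hf with rfl | hf
      · rcases List.mem_cons.1 hc with rfl | hc'
        · exact ⟨List.mem_cons_self .., h⟩
        · have := ih h0 c (by rw [hh]; exact List.mem_cons_self ..) hc'
          exact ⟨List.mem_cons_of_mem _ this.1, this.2⟩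
      · have := ih f c (by rw [hh]; exact List.mem_cons_of_mem _ hf) hc
        exact ⟨List.mem_cons_of_mem _ this.1, this.2⟩

def pvExpandO (rank : List Char) : List (Option Char) :=
  rank.flatMap (fun c => if PySem.Chars.isdigit c then
    List.replicate (c.toNat - 48) (none : Option Char) else [some c])

def pvPadE (rank : List Char) : List (Option Char) :=
  pvExpandO rank ++ List.replicate (8 - pvWidth rank) none

theorem pv_length_expandO (rank : List Char) : (pvExpandO rank).length = pvWidth rank := by
  induction rank with
  | nil => rfl
  | cons c cs ih =>
    by_cases h : PySem.Chars.isdigit c <;>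
      simp [pvExpandO, pvWidth, h, List.flatMap_cons] at ih ⊢ <;> omega

theorem pv_drop_none (b : List (Option Char)) (i k : Nat)
    (hik : i + k ≤ b.length)
    (h : ∀ j, i ≤ j → j < i + k → b[j]? = some none) :
    b.drop i = List.replicate k none ++ b.drop (i + k) := by
  induction k generalizing i with
  | zero => simp
  | succ k ih =>
    have hi : i < b.length := by omega
    rw [List.drop_eq_getElem_cons hi]
    have hbi : b[i] = none := by
      have := h i (by omega) (by omega)
      rw [List.getElem?_eq_getElem hi] at this
      simpa using this
    have := ih (i + 1) (by omega) (fun j h1 h2 => h j (by omega) (by omega))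
    rw [hbi, this, show i + 1 + k = i + (k+1) by omega]
    simp [List.replicate_succ]

theorem pv_take_none (b : List (Option Char)) (i k : Nat)
    (hik : i + k ≤ b.length)
    (h : ∀ j, i ≤ j → j < i + k → b[j]? = some none) :
    b.take (i + k) = b.take i ++ List.replicate k none := by
  rw [List.take_add]
  congr 1
  rw [pv_drop_none b i k hik h]
  rw [List.take_append_of_le_length (by simp), List.take_of_length_le (by simp)]

theorem pvP1 : ∀ (rc rest : List Char) (b : List (Option Char)) (r f : Nat),
    '/' ∉ rc → b.length = 64 → r ≤ 7 → f + pvWidth rc ≤ 8 →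
    (∀ j, 8*r + f ≤ j → j < 8*r + f + pvWidth rc → b[j]? = some none) →
    pvParseLoop (rc ++ rest) b (r : Int) (f : Int) =
      pvParseLoop rest
        (b.take (8*r + f) ++ pvExpandO rc ++ b.drop (8*r + f + pvWidth rc))
        (r : Int) ((f + pvWidth rc : Nat) : Int) := by
  intro rc
  induction rc with
  | nil =>
    intro rest b r f _ _ _ _ _
    simp [pvExpandO, pvWidth, List.take_append_drop]
  | cons c cs ih =>
    intro rest b r f hns hb hr hf hnone
    have hcns : c ≠ '/' := fun h => hns (h ▸ List.mem_cons_self ..)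
    by_cases hd : PySem.Chars.isdigit c
    · -- digit: value v = c.toNat - 48, 48 ≤ c.toNat
      have hc48 : 48 ≤ c.toNat ∧ c.toNat ≤ 57 := by
        simp [PySem.Chars.isdigit] at hd
        exact ⟨hd.1, hd.2⟩
      set v := c.toNat - 48 with hv
      have hw : pvWidth (c :: cs) = v + pvWidth cs := by
        simp [pvWidth, hd]; omega
      rw [hw] at hf hnone
      have step : pvParseLoop ((c :: cs) ++ rest) b (r : Int) (f : Int)
          = pvParseLoop (cs ++ rest) b (r : Int) ((f + v : Nat) : Int) := by
        simp only [List.cons_append, pvParseLoop, if_neg hcns, if_pos hd]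
        congr 1
        push_cast
        omega
      rw [step, ih rest b r (f + v) (fun h => hns (List.mem_cons_of_mem _ h)) hb hr (by omega)
        (fun j h1 h2 => hnone j (by omega) (by omega))]
      have hreg : b.take (8*r + (f + v)) = b.take (8*r + f) ++ List.replicate v none := by
        rw [show 8*r + (f+v) = (8*r+f) + v by omega]
        exact pv_take_none b _ v (by omega) (fun j h1 h2 => hnone j (by omega) (by omega))
      rw [hreg]
      have hexp : pvExpandO (c :: cs) = List.replicate v none ++ pvExpandO cs := by
        simp [pvExpandO, hd, hv]
      rw [hexp, hw]
      have : 8*r + (f + v) + pvWidth cs = 8*r + f + (v + pvWidth cs) := by omega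
      rw [this]
      congr 1
      simp [List.append_assoc]
      congr 1
      omega
    · -- piece
      have hw : pvWidth (c :: cs) = 1 + pvWidth cs := by simp [pvWidth, hd]
      rw [hw] at hf hnone
      set i := 8*r + f with hi
      have hilt : i < 64 := by omega
      have step : pvParseLoop ((c :: cs) ++ rest) b (r : Int) (f : Int)
          = pvParseLoop (cs ++ rest) (b.set i (some c)) (r : Int) ((f + 1 : Nat) : Int) := by
        simp only [List.cons_append, pvParseLoop, if_neg hcns, if_neg hd]
        rw [show (r : Int) * 8 + (f : Int) = ((i : Nat) : Int) by push_cast; omega,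
            PySem.List.pySetD_natCast]
        norm_cast
      rw [step, ih rest (b.set i (some c)) r (f+1) (fun h => hns (List.mem_cons_of_mem _ h))
        (by simpa using hb) hr (by omega)
        (fun j h1 h2 => by
          rw [List.getElem?_set_ne (by omega)]
          exact hnone j (by omega) (by omega))]
      have ht : (b.set i (some c)).take (8*r + (f+1)) = b.take i ++ [some c] := by
        rw [show 8*r + (f+1) = i + 1 by omega, List.take_succ]
        rw [List.getElem?_set_self (by omega)]
        rw [List.take_set, List.set_eq_of_length_le (by simp)]
        simp
      have hdr : (b.set i (some c)).drop (8*r + (f+1) + pvWidth cs) = b.drop (i + 1 + pvWidth cs) := by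
        rw [show 8*r + (f+1) = i + 1 by omega]
        rw [List.drop_set_of_lt (by omega)]
      rw [ht, hdr]
      have hexp : pvExpandO (c :: cs) = some c :: pvExpandO cs := by simp [pvExpandO, hd]
      rw [hexp, hw, show i + (1 + pvWidth cs) = i + 1 + pvWidth cs by omega]
      simp only [List.append_assoc, List.cons_append, List.singleton_append]
      congr 1
      push_cast
      ring

theorem pvP2 : ∀ (rs : List (List Char)) (b : List (Option Char)) (r : Nat),
    (∀ rc ∈ rs, '/' ∉ rc ∧ pvWidth rc ≤ 8) → b.length = 64 → r ≤ 7 →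
    rs.length ≤ r + 1 →
    (∀ j, j < 8*(r+1) → b[j]? = some none) →
    pvParseLoop (pvJoinSlash rs) b (r : Int) 0 =
      b.take (8*(r+1) - 8*rs.length) ++ (rs.map pvPadE).reverse.flatten ++ b.drop (8*(r+1)) := by
  intro rs
  induction rs with
  | nil =>
    intro b r _ _ _ _ _
    simp [pvJoinSlash, pvParseLoop, List.take_append_drop]
  | cons rc rs' ih =>
    intro b r hall hb hr hlen hnone
    have hrc := hall rc (List.mem_cons_self ..)
    have h1 : pvParseLoop (rc ++ ('/' :: pvJoinSlash rs')) b (r : Int) 0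
        = pvParseLoop ('/' :: pvJoinSlash rs')
            (b.take (8*r) ++ pvExpandO rc ++ b.drop (8*r + pvWidth rc)) (r : Int)
            ((pvWidth rc : Nat) : Int) := by
      have := pvP1 rc ('/' :: pvJoinSlash rs') b r 0 hrc.1 hb hr (by omega)
        (fun j h1 h2 => hnone j (by omega))
      simpa using this
    have hmidlen : (b.take (8*r) ++ pvExpandO rc ++ b.drop (8*r + pvWidth rc)).length = 64 := by
      simp [pv_length_expandO]
      omega
    cases rs' with
    | nil =>
      -- last rank: pvJoinSlash [rc] = rc
      have h1' : pvParseLoop (pvJoinSlash [rc]) b (r : Int) 0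
          = b.take (8*r) ++ pvExpandO rc ++ b.drop (8*r + pvWidth rc) := by
        have := pvP1 rc [] b r 0 hrc.1 hb hr (by omega) (fun j h1 h2 => hnone j (by omega))
        simpa [pvJoinSlash, pvParseLoop] using this
      rw [h1']
      have hd : b.drop (8*r + pvWidth rc)
          = List.replicate (8 - pvWidth rc) none ++ b.drop (8*(r+1)) := by
        have := pv_drop_none b (8*r + pvWidth rc) (8 - pvWidth rc) (by omega)
          (fun j hj1 hj2 => hnone j (by omega))
        rw [this, show 8*r + pvWidth rc + (8 - pvWidth rc) = 8*(r+1) by omega]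
      rw [hd]
      simp [pvPadE, List.append_assoc, show 8*(r+1) - 8*1 = 8*r by omega]
    | cons rc2 rs'' =>
      set rs' := rc2 :: rs'' with hrs'
      have hjoin : pvJoinSlash (rc :: rs') = rc ++ '/' :: pvJoinSlash rs' := rfl
      rw [hjoin, h1]
      set bmid := b.take (8*r) ++ pvExpandO rc ++ b.drop (8*r + pvWidth rc) with hbmid
      have hstep : pvParseLoop ('/' :: pvJoinSlash rs') bmid (r : Int) ((pvWidth rc : Nat) : Int)
          = pvParseLoop (pvJoinSlash rs') bmid ((r : Int) - 1) 0 := by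
        simp [pvParseLoop]
      have hr1 : 1 ≤ r := by
        have : rs'.length ≥ 1 := by simp [hrs']
        simp at hlen
        omega
      have hcast : (r : Int) - 1 = ((r - 1 : Nat) : Int) := by push_cast [hr1]; ring
      rw [hstep, hcast]
      have hbmid_pre : ∀ j, j < 8*r → bmid[j]? = some none := by
        intro j hj
        rw [hbmid]
        rw [List.getElem?_append_left (by simp; omega), List.getElem?_append_left (by simp; omega),
          List.getElem?_take_of_lt hj]
        exact hnone j (by omega)
      have := ih bmid (r - 1) (fun x hx => hall x (List.mem_cons_of_mem _ hx)) hmidlen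
        (by omega) (by simp at hlen ⊢; omega)
        (fun j hj => hbmid_pre j (by omega))
      rw [this, show 8*(r-1+1) = 8*r by omega]
      -- assemble
      have e1 : bmid.take (8*r - 8*rs'.length) = b.take (8*r - 8*rs'.length) := by
        rw [hbmid, List.append_assoc, List.take_append_of_le_length (by simp; omega),
          List.take_take, min_eq_left (by omega)]
      have e2 : bmid.drop (8*r) = pvExpandO rc ++ List.replicate (8 - pvWidth rc) none
          ++ b.drop (8*(r+1)) := by
        rw [hbmid, List.append_assoc, List.drop_append_of_le_length (by simp; omega)]
        rw [show List.drop (8*r) (List.take (8*r) b) = ([] : List (Option Char)) from by simp,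
          List.nil_append]
        have := pv_drop_none b (8*r + pvWidth rc) (8 - pvWidth rc) (by omega)
          (fun j hj1 hj2 => hnone j (by omega))
        rw [this, show 8*r + pvWidth rc + (8 - pvWidth rc) = 8*(r+1) by omega]
        simp [List.append_assoc]
      rw [e1, e2]
      simp only [List.map_cons, List.reverse_cons, List.flatten_append, List.flatten_cons,
        List.flatten_nil, List.append_nil, List.length_cons]
      rw [show 8*(r+1) - 8*(rs'.length+1) = 8*r - 8*rs'.length by omega]
      simp [pvPadE, List.append_assoc]

def pvMirrorStep' (m : List (Option Char)) (p : Int × Option Char) : List (Option Char) :=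
  match p.2 with
  | none => m
  | some piece => PySem.List.pySetD m (63 - p.1) (some (pvSwapChar piece))

theorem pv_mirfold : ∀ (l acc : List (Option Char)) (s : Nat),
    acc.length = 64 → s + l.length ≤ 64 →
    (∀ k, 64 - (s + l.length) ≤ k → k < 64 - s → acc[k]? = some none) →
    (PySem.List.enumerate l (s : Int)).foldl pvMirrorStep' acc
      = acc.take (64 - s - l.length) ++ (l.map (Option.map pvSwapChar)).reverse
          ++ acc.drop (64 - s) := by
  intro l
  induction l with
  | nil =>
    intro acc s hlen _ _
    simp [PySem.List.enumerate_nil, List.take_append_drop]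
  | cons p l' ih =>
    intro acc s hlen hs hnone
    have hs' : s + l'.length + 1 ≤ 64 := by
      simp only [List.length_cons] at hs; omega
    rw [PySem.List.enumerate_cons]
    cases p with
    | none =>
      have hstep : pvMirrorStep' acc ((s : Int), none) = acc := rfl
      rw [List.foldl_cons, hstep, show (s : Int) + 1 = ((s + 1 : Nat) : Int) by push_cast; ring,
        ih acc (s+1) hlen (by simp only [List.length_cons] at hs ⊢; omega)
          (fun k h1 h2 => hnone k (by simp only [List.length_cons] at h1 ⊢; omega) (by omega))]
      have hidx : 64 - s - 1 < acc.length := by omega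
      have hdrop : acc.drop (64 - (s+1)) = none :: acc.drop (64 - s) := by
        rw [show 64 - (s+1) = 64 - s - 1 by omega, List.drop_eq_getElem_cons hidx]
        have := hnone (64 - s - 1) (by simp only [List.length_cons]; omega) (by omega)
        rw [List.getElem?_eq_getElem hidx] at this
        simp at this
        rw [this, show 64 - s - 1 + 1 = 64 - s by omega]
      rw [hdrop]
      simp only [List.map_cons, Option.map_none, List.reverse_cons, List.append_assoc,
        List.length_cons]
      rw [show 64 - (s+1) - l'.length = 64 - s - (l'.length + 1) by omega]
      simp
    | some c =>
      have hidx : 63 - s < 64 := by omega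
      have hslt : s ≤ 63 := by simp at hs; omega
      have hstep : pvMirrorStep' acc ((s : Int), some c)
          = acc.set (63 - s) (some (pvSwapChar c)) := by
        simp only [pvMirrorStep']
        rw [show (63 : Int) - (s : Int) = ((63 - s : Nat) : Int) by push_cast [hslt]; ring,
          PySem.List.pySetD_natCast]
      rw [List.foldl_cons, hstep, show (s : Int) + 1 = ((s + 1 : Nat) : Int) by push_cast; ring]
      set acc' := acc.set (63 - s) (some (pvSwapChar c)) with hacc'
      have hlen' : acc'.length = 64 := by simp [hacc', hlen]
      rw [ih acc' (s+1) hlen' (by simp only [List.length_cons] at hs ⊢; omega)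
        (fun k h1 h2 => by
          rw [hacc', List.getElem?_set_ne (by omega)]
          exact hnone k (by simp only [List.length_cons] at h1 ⊢; omega) (by omega))]
      have e1 : acc'.take (64 - (s+1) - l'.length) = acc.take (64 - s - (l'.length + 1)) := by
        rw [hacc', List.take_set, List.set_eq_of_length_le (by simp only [List.length_take, hlen]; omega),
          show 64 - (s+1) - l'.length = 64 - s - (l'.length + 1) by omega]
      have e2 : acc'.drop (64 - (s+1))
          = some (pvSwapChar c) :: acc.drop (64 - s) := by
        have h63 : 63 - s < acc'.length := by omega
        rw [show 64 - (s+1) = 63 - s by omega, List.drop_eq_getElem_cons h63]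
        congr 1
        · have hg : acc'[63 - s]? = some (some (pvSwapChar c)) := by
            rw [hacc', List.getElem?_set_self (by omega)]
          rw [List.getElem?_eq_getElem h63] at hg
          simpa using hg
        · rw [hacc', List.drop_set_of_lt (by omega), show 63 - s + 1 = 64 - s by omega]
      rw [e1, e2]
      simp [List.append_assoc]

def pvRLEO (row : List (Option Char)) : String :=
  let st := row.foldl pvStepO ((0 : Int), ([] : List Char))
  String.ofList (st.2 ++ (if st.1 ≠ 0 then PySem.Int.toChars st.1 else []))

def pvCharOf (o : Option Char) : Char := o.getD ' '

theorem pv_rankRLE_chunk (pre row post : List (Option Char)) (r : Nat)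
    (hpre : pre.length = 8*r) (hrow : row.length = 8) :
    pvRankRLE (pre ++ row ++ post) ((r : Nat) : Int) = pvRLEO row := by
  unfold pvRankRLE pvRLEO
  have key : (PySem.List.pyRange 0 8 1).foldl (fun st fileIdx =>
      pvStepO st (PySem.List.pyGetD (pre ++ row ++ post) ((r : Int) * 8 + fileIdx) none))
      ((0 : Int), ([] : List Char))
      = row.foldl pvStepO ((0 : Int), ([] : List Char)) := by
    have hshift : (PySem.List.pyRange 0 8 1).map (fun f => (r : Int) * 8 + f)
        = PySem.List.pyRange ((8*r : Nat) : Int) ((8*r : Nat) + 8) 1 := by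
      rw [PySem.List.pyRange_one, PySem.List.pyRange_one, List.map_map]
      have : (((8*r : Nat) : Int) + 8 - ((8*r : Nat) : Int)).toNat = ((8 : Int) - 0).toNat := by omega
      rw [this]
      apply List.map_congr_left
      intro k _
      simp
      push_cast
      ring
    have hfm : (PySem.List.pyRange 0 8 1).foldl (fun st fileIdx =>
        pvStepO st (PySem.List.pyGetD (pre ++ row ++ post) ((r : Int) * 8 + fileIdx) none))
        ((0 : Int), ([] : List Char))
        = (PySem.List.pyRange ((8*r : Nat) : Int) ((8*r : Nat) + 8) 1).foldl (fun st j =>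
            pvStepO st (PySem.List.pyGetD (pre ++ row ++ post) j none))
          ((0 : Int), ([] : List Char)) := by
      rw [← hshift, List.foldl_map]
    rw [hfm]
    have hcong : (PySem.List.pyRange ((8*r : Nat) : Int) ((8*r : Nat) + 8) 1).foldl (fun st j =>
          pvStepO st (PySem.List.pyGetD (pre ++ row ++ post) j none))
        ((0 : Int), ([] : List Char))
        = (PySem.List.pyRange ((8*r : Nat) : Int) ((8*r : Nat) + 8) 1).foldl (fun st j =>
            pvStepO st (PySem.List.pyGetD (pre ++ row) j none))
          ((0 : Int), ([] : List Char)) := by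
      apply PySem.List.foldl_congr_mem
      intro acc j hj
      rw [PySem.List.mem_pyRange_one] at hj
      have h0 : 0 ≤ j := le_trans (by positivity) hj.1
      have hjlt : j.toNat < (pre ++ row).length := by
        simp [hpre, hrow]
        omega
      rw [PySem.List.pyGetD_eq_getElem (pre ++ row ++ post) none h0
          (by simp [hpre, hrow] at hjlt ⊢; omega),
        PySem.List.pyGetD_eq_getElem (pre ++ row) none h0 (by
          simp only [List.length_append, hpre, hrow] at hjlt ⊢
          omega)]
      congr 1
      exact List.getElem_append_left hjlt
    rw [hcong]
    have hlen : ((8*r : Nat) : Int) + 8 = PySem.List.len (pre ++ row) := by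
      simp only [PySem.List.len_eq, List.length_append, hpre, hrow]
      push_cast
      ring
    rw [hlen, PySem.List.foldl_pyRange_pyGetD (pre ++ row) none pvStepO _ (by positivity)]
    rw [Int.toNat_natCast, ← hpre, List.drop_left]
  simp only [key]

theorem pv_slice_chunk (pre row post : List Char) (i : Int)
    (h0 : 0 ≤ i) (hpre : pre.length = i.toNat) (hrow : row.length = 8) :
    PySem.List.slice (pre ++ row ++ post) (some i) (some (i + 8)) = row := by
  rw [show i = ((i.toNat : Nat) : Int) by omega,
    show ((i.toNat : Nat) : Int) + 8 = ((i.toNat : Nat) : Int) + ((8 : Nat) : Int) by norm_num,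
    PySem.List.slice_natCast_add]
  rw [show pre ++ row ++ post = pre ++ (row ++ post) by simp, ← hpre, List.drop_left]
  rw [← hrow, List.take_left]

theorem pv_RLE_core (T : List (Option Char)) (hT : ∀ x, some x ∈ T → x ≠ ' ') :
    pvRLEO T = pvChunkRLE (T.map pvCharOf) := by
  unfold pvRLEO pvChunkRLE
  have : ∀ (st : Int × List Char), T.foldl pvStepO st = (T.map pvCharOf).foldl pvStepC st := by
    induction T with
    | nil => intro st; rfl
    | cons o T' ih =>
      intro st
      rw [List.map_cons, List.foldl_cons, List.foldl_cons]
      have hstep : pvStepO st o = pvStepC st (pvCharOf o) := by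
        cases o with
        | none => simp [pvStepO, pvStepC, pvCharOf]
        | some x =>
          have hx : x ≠ ' ' := hT x (List.mem_cons_self ..)
          simp [pvStepO, pvStepC, pvCharOf, hx]
      rw [hstep]
      exact ih (fun x hx => hT x (List.mem_cons_of_mem _ hx)) _
  simp only [this]

def pvPadE' (rank : List Char) : List Char := pvLjust (pvExpandRank rank) 8

theorem pv_swap_space : pvSwapChar ' ' = ' ' := by decide

theorem pv_swap_ne_space_ascii : ∀ n : Nat, n < 127 →
    (32 < n → pvSwapChar (Char.ofNat n) ≠ ' ') := by decide

theorem pv_swap_ne_space {c : Char} (hdom : pvDomChar c = true)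
    (hsp : PySem.Chars.isspace c = false) : pvSwapChar c ≠ ' ' := by
  have hn : c.toNat ≤ 126 ∧ (32 ≤ c.toNat ∨ c.toNat = 9 ∨ c.toNat = 10 ∨ c.toNat = 13) := by
    simp [pvDomChar] at hdom
    omega
  have h32 : 32 < c.toNat := by
    simp [PySem.Chars.isspace] at hsp
    omega
  have := pv_swap_ne_space_ascii c.toNat (by omega) h32
  rwa [Char.ofNat_toNat] at this

theorem pv_expandRank_eq (rank : List Char) :
    pvExpandRank rank = (pvExpandO rank).map pvCharOf := by
  unfold pvExpandRank pvExpandO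
  induction rank with
  | nil => rfl
  | cons c cs ih =>
    rw [List.flatMap_cons, List.flatMap_cons, List.map_append, ih]
    by_cases h : PySem.Chars.isdigit c <;> simp [h, pvCharOf, List.map_replicate]

theorem pv_padE'_eq (rank : List Char) :
    pvPadE' rank = (pvPadE rank).map pvCharOf := by
  unfold pvPadE' pvPadE pvLjust
  rw [List.map_append, pv_expandRank_eq, List.map_replicate]
  simp [pv_length_expandO, pvCharOf]

theorem pv_padE_len (rank : List Char) (h : pvWidth rank ≤ 8) : (pvPadE rank).length = 8 := by
  simp [pvPadE, pv_length_expandO]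
  omega

theorem pv_flatten_replicate_none (k : Nat) :
    (List.replicate k (List.replicate 8 (none : Option Char))).flatten
      = List.replicate (8*k) none := by
  induction k with
  | zero => simp
  | succ k ih =>
    rw [List.replicate_succ, List.flatten_cons, ih,
      show 8*(k+1) = 8 + 8*k by ring, List.replicate_add]

theorem pv_replicate_map_charOf (k : Nat) :
    (List.replicate k (List.replicate 8 (none : Option Char))).map (List.map pvCharOf)
      = List.replicate k (List.replicate 8 ' ') := by
  simp [List.map_replicate, pvCharOf]


theorem pv_exists8 {α : Type} (l : List α) (h : l.length = 8) :
    ∃ a b c d e f g h', l = [a, b, c, d, e, f, g, h'] := by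
  rcases l with _|⟨a,_|⟨b,_|⟨c,_|⟨d,_|⟨e,_|⟨f,_|⟨g,_|⟨h',_|⟨i,t⟩⟩⟩⟩⟩⟩⟩⟩⟩ <;> simp at h
  exact ⟨a, b, c, d, e, f, g, h', rfl⟩

theorem pv_mem_expandO {rc : List Char} {x : Char} (h : some x ∈ pvExpandO rc) : x ∈ rc := by
  induction rc with
  | nil => simp [pvExpandO] at h
  | cons c cs ih =>
    unfold pvExpandO at h ih
    rw [List.flatMap_cons, List.mem_append] at h
    rcases h with h | h
    · by_cases hd : PySem.Chars.isdigit c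
      · rw [if_pos hd] at h
        have := List.eq_of_mem_replicate h
        simp at this
      · rw [if_neg hd] at h
        simp at h
        simp [h]
    · exact List.mem_cons_of_mem _ (ih h)

theorem pv_flatten_replicate_space (k : Nat) :
    (List.replicate k (List.replicate 8 ' ')).flatten = List.replicate (8*k) ' ' := by
  induction k with
  | zero => simp
  | succ k ih =>
    rw [List.replicate_succ, List.flatten_cons, ih,
      show 8*(k+1) = 8 + 8*k by ring, List.replicate_add]

theorem pv_row_corr (R : List (Option Char)) (hR : ∀ x : Char, some x ∈ R → pvSwapChar x ≠ ' ') :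
    pvRLEO ((R.map (Option.map pvSwapChar)).reverse)
      = pvChunkRLE (((R.map pvCharOf).map pvSwapChar).reverse) := by
  rw [show (R.map (Option.map pvSwapChar)).reverse = R.reverse.map (Option.map pvSwapChar) from
    (List.map_reverse ..).symm]
  rw [show ((R.map pvCharOf).map pvSwapChar).reverse = (R.map pvCharOf).reverse.map pvSwapChar from
    (List.map_reverse ..).symm]
  rw [show (R.map pvCharOf).reverse = R.reverse.map pvCharOf from (List.map_reverse ..).symm]
  rw [pv_RLE_core (R.reverse.map (Option.map pvSwapChar)) (by
    intro x hx
    rw [List.mem_map] at hx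
    obtain ⟨o, ho, hox⟩ := hx
    cases o with
    | none => simp at hox
    | some y =>
      simp at hox
      subst hox
      exact hR y (by rwa [← List.mem_reverse]))]
  congr 1
  rw [List.map_map, List.map_map]
  apply List.map_congr_left
  intro o _
  cases o with
  | none => simp [pvCharOf, pv_swap_space]
  | some y => simp [pvCharOf]


theorem pv_flatten_len8 {α : Type} (Ls : List (List α)) (h : ∀ l ∈ Ls, l.length = 8) :
    Ls.flatten.length = 8 * Ls.length := by
  induction Ls with
  | nil => simp
  | cons l t ih =>
    rw [List.flatten_cons, List.length_append, h l (List.mem_cons_self ..),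
      ih (fun x hx => h x (List.mem_cons_of_mem _ hx)), List.length_cons]
    ring

set_option maxHeartbeats 1600000 in
theorem pv_rows_eq (bf : List Char)
    (hch : ∀ c ∈ bf, pvSwapChar c ≠ ' ')
    (hL : (pvSplitSlash bf).length ≤ 8)
    (hw : ∀ rc ∈ pvSplitSlash bf, pvWidth rc ≤ 8) :
    (PySem.List.pyRange 7 (-1) (-1)).foldl (fun rows r => rows ++
        [pvRankRLE ((PySem.List.enumerate (pvParseLoop bf (List.replicate 64 none) 7 0) 0).foldl
          pvMirrorStep (List.replicate 64 none)) r]) []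
      = (PySem.List.pyRange 0 64 8).foldl (fun rows i => rows ++
          [pvChunkRLE (PySem.List.slice
            ((pvLjust ((PySem.Chars.splitOn bf ['/']).flatMap (fun r => pvLjust (pvExpandRank r) 8)) 64).reverse.map
              pvSwapChar)
            (some i) (some (i + 8)))]) [] := by
  rw [pv_splitOn_eq bf]
  set ranks := pvSplitSlash bf with hranks
  have hns : ∀ rc ∈ ranks, '/' ∉ rc := fun rc h hs => (pv_splitSlash_chars bf rc '/' h hs).2 rfl
  have hrch : ∀ rc ∈ ranks, ∀ x ∈ rc, pvSwapChar x ≠ ' ' :=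
    fun rc h x hx => hch x (pv_splitSlash_chars bf rc x h hx).1
  set L := ranks.length with hLdef
  -- A: the parsed board
  have hboard : pvParseLoop bf (List.replicate 64 none) 7 0
      = List.replicate (64 - 8*L) none ++ (ranks.map pvPadE).reverse.flatten := by
    conv_lhs => rw [← pv_joinSlash_splitSlash bf, ← hranks]
    have h2 := pvP2 ranks (List.replicate 64 none) 7 (fun rc h => ⟨hns rc h, hw rc h⟩)
      (by simp) (by norm_num) (by omega)
      (fun j hj => by rw [List.getElem?_replicate]; simp; omega)
    rw [show ((7:Nat):Int) = (7:Int) from by norm_num] at h2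
    rw [h2, List.take_replicate, List.drop_replicate]
    simp
    omega
  set Rs := ranks.map pvPadE ++ List.replicate (8 - L) (List.replicate 8 (none : Option Char))
    with hRsdef
  have hRslen : Rs.length = 8 := by simp [hRsdef]; omega
  have hRmem : ∀ R ∈ Rs, R.length = 8 := by
    intro R hR
    rw [hRsdef, List.mem_append] at hR
    rcases hR with h | h
    · obtain ⟨rc, hrc, rfl⟩ := List.mem_map.1 h
      exact pv_padE_len rc (hw rc hrc)
    · rw [List.eq_of_mem_replicate h]; simp
  have hRpieces : ∀ R ∈ Rs, ∀ x : Char, some x ∈ R → pvSwapChar x ≠ ' ' := by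
    intro R hR x hx
    rw [hRsdef, List.mem_append] at hR
    rcases hR with h | h
    · obtain ⟨rc, hrc, rfl⟩ := List.mem_map.1 h
      unfold pvPadE at hx
      rw [List.mem_append] at hx
      rcases hx with hx | hx
      · exact hrch rc hrc x (pv_mem_expandO hx)
      · have := List.eq_of_mem_replicate hx; simp at this
    · rw [List.eq_of_mem_replicate h] at hx
      have := List.eq_of_mem_replicate hx; simp at this
  have hboard2 : pvParseLoop bf (List.replicate 64 none) 7 0 = Rs.reverse.flatten := by
    rw [hboard, hRsdef, List.reverse_append, List.reverse_replicate, List.flatten_append,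
      pv_flatten_replicate_none]
    congr 2
    omega
  have hblen : (pvParseLoop bf (List.replicate 64 none) 7 0).length = 64 := by
    rw [hboard2, pv_flatten_len8 Rs.reverse (fun l hl => hRmem l (List.mem_reverse.1 hl)),
      List.length_reverse, hRslen]
  -- A: the mirrored board
  have hmircong : (PySem.List.enumerate (pvParseLoop bf (List.replicate 64 none) 7 0) 0).foldl
        pvMirrorStep (List.replicate 64 none)
      = (PySem.List.enumerate (pvParseLoop bf (List.replicate 64 none) 7 0) 0).foldl
          pvMirrorStep' (List.replicate 64 none) := by
    apply PySem.List.foldl_congr_mem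
    intro acc p hp
    rw [PySem.List.mem_enumerate_iff] at hp
    obtain ⟨k, hk, rfl⟩ := hp
    rw [hblen] at hk
    unfold pvMirrorStep pvMirrorStep'
    cases (pvParseLoop bf (List.replicate 64 none) 7 0)[k] with
    | none => rfl
    | some c =>
      simp only [zero_add]
      congr 1
      rw [show (8:Int) = ((8:Nat):Int) from by norm_num,
        PySem.Int.mod_natCast k 8, PySem.Int.floordiv_natCast k 8]
      push_cast
      omega
  have hmirror : (PySem.List.enumerate (pvParseLoop bf (List.replicate 64 none) 7 0) 0).foldl
        pvMirrorStep (List.replicate 64 none)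
      = ((pvParseLoop bf (List.replicate 64 none) 7 0).map (Option.map pvSwapChar)).reverse := by
    rw [hmircong]
    have h3 := pv_mirfold (pvParseLoop bf (List.replicate 64 none) 7 0)
      (List.replicate 64 none) 0 (by simp) (by omega)
      (fun k h1 h2 => by rw [List.getElem?_replicate]; simp; omega)
    rw [Nat.cast_zero] at h3
    rw [h3, hblen]
    simp
  -- destructure the eight ranks
  obtain ⟨R0, R1, R2, R3, R4, R5, R6, R7, hRs⟩ := pv_exists8 Rs hRslen
  have l0 : R0.length = 8 := hRmem R0 (by rw [hRs]; simp)
  have l1 : R1.length = 8 := hRmem R1 (by rw [hRs]; simp)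
  have l2 : R2.length = 8 := hRmem R2 (by rw [hRs]; simp)
  have l3 : R3.length = 8 := hRmem R3 (by rw [hRs]; simp)
  have l4 : R4.length = 8 := hRmem R4 (by rw [hRs]; simp)
  have l5 : R5.length = 8 := hRmem R5 (by rw [hRs]; simp)
  have l6 : R6.length = 8 := hRmem R6 (by rw [hRs]; simp)
  have l7 : R7.length = 8 := hRmem R7 (by rw [hRs]; simp)
  -- the mirrored board, chunked
  set g := Option.map pvSwapChar with hg
  have hmirM : (PySem.List.enumerate (pvParseLoop bf (List.replicate 64 none) 7 0) 0).foldl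
        pvMirrorStep (List.replicate 64 none)
      = (R0.map g).reverse ++ (R1.map g).reverse ++ (R2.map g).reverse ++ (R3.map g).reverse
        ++ (R4.map g).reverse ++ (R5.map g).reverse ++ (R6.map g).reverse ++ (R7.map g).reverse := by
    rw [hmirror, hboard2, hRs]
    simp [List.reverse_append, List.map_append, List.append_assoc]
  -- B: the expanded/flipped board
  set cf := List.map pvCharOf with hcf
  have hCslen : ∀ R ∈ Rs, (cf R).length = 8 := by
    intro R hR; rw [hcf, List.length_map]; exact hRmem R hR
  have hexp : pvLjust (ranks.flatMap (fun r => pvLjust (pvExpandRank r) 8)) 64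
      = (Rs.map cf).flatten := by
    have hfm : ranks.flatMap (fun r => pvLjust (pvExpandRank r) 8)
        = ((ranks.map pvPadE).map cf).flatten := by
      rw [List.flatMap_def]
      congr 1
      rw [List.map_map]
      apply List.map_congr_left
      intro rc _
      have := pv_padE'_eq rc
      unfold pvPadE' at this
      exact this
    rw [hfm]
    have hinlen : (((ranks.map pvPadE).map cf).flatten).length = 8 * L := by
      rw [pv_flatten_len8]
      · simp [hLdef]
      · intro l hl
        rw [List.map_map] at hl
        obtain ⟨rc, hrc, rfl⟩ := List.mem_map.1 hl
        simp [hcf, pv_padE_len rc (hw rc hrc)]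
    unfold pvLjust
    rw [hinlen, hRsdef, List.map_append, List.flatten_append]
    congr 1
    rw [show List.map cf (List.replicate (8 - L) (List.replicate 8 (none : Option Char)))
        = List.replicate (8 - L) (List.replicate 8 ' ') from by rw [hcf]; exact pv_replicate_map_charOf _,
      pv_flatten_replicate_space]
    congr 1
    omega
  have hflip : ((pvLjust (ranks.flatMap (fun r => pvLjust (pvExpandRank r) 8)) 64).reverse.map
        pvSwapChar)
      = ((cf R7).map pvSwapChar).reverse ++ ((cf R6).map pvSwapChar).reverse
        ++ ((cf R5).map pvSwapChar).reverse ++ ((cf R4).map pvSwapChar).reverse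
        ++ ((cf R3).map pvSwapChar).reverse ++ ((cf R2).map pvSwapChar).reverse
        ++ ((cf R1).map pvSwapChar).reverse ++ ((cf R0).map pvSwapChar).reverse := by
    rw [hexp, hRs]
    simp [List.reverse_append, List.map_append, List.append_assoc, List.map_reverse]
  -- chunk lengths
  have ml0 : ((R0.map g).reverse).length = 8 := by simp [l0]
  have ml1 : ((R1.map g).reverse).length = 8 := by simp [l1]
  have ml2 : ((R2.map g).reverse).length = 8 := by simp [l2]
  have ml3 : ((R3.map g).reverse).length = 8 := by simp [l3]
  have ml4 : ((R4.map g).reverse).length = 8 := by simp [l4]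
  have ml5 : ((R5.map g).reverse).length = 8 := by simp [l5]
  have ml6 : ((R6.map g).reverse).length = 8 := by simp [l6]
  have ml7 : ((R7.map g).reverse).length = 8 := by simp [l7]
  have nl0 : (((cf R0).map pvSwapChar).reverse).length = 8 := by simp [hcf, l0]
  have nl1 : (((cf R1).map pvSwapChar).reverse).length = 8 := by simp [hcf, l1]
  have nl2 : (((cf R2).map pvSwapChar).reverse).length = 8 := by simp [hcf, l2]
  have nl3 : (((cf R3).map pvSwapChar).reverse).length = 8 := by simp [hcf, l3]
  have nl4 : (((cf R4).map pvSwapChar).reverse).length = 8 := by simp [hcf, l4]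
  have nl5 : (((cf R5).map pvSwapChar).reverse).length = 8 := by simp [hcf, l5]
  have nl6 : (((cf R6).map pvSwapChar).reverse).length = 8 := by simp [hcf, l6]
  have nl7 : (((cf R7).map pvSwapChar).reverse).length = 8 := by simp [hcf, l7]
  have hA0 : pvRankRLE ((PySem.List.enumerate (pvParseLoop bf (List.replicate 64 none) 7 0) 0).foldl
        pvMirrorStep (List.replicate 64 none)) 0 = pvRLEO ((R0.map g).reverse) := by
    have h := pv_rankRLE_chunk (([] : List (Option Char))) ((R0.map g).reverse)
      ((R1.map g).reverse ++ (R2.map g).reverse ++ (R3.map g).reverse ++ (R4.map g).reverse ++ (R5.map g).reverse ++ (R6.map g).reverse ++ (R7.map g).reverse) 0 (by simp) ml0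
    rw [show ((0:Nat):Int) = (0:Int) from by norm_num] at h
    rw [hmirM, show (R0.map g).reverse ++ (R1.map g).reverse ++ (R2.map g).reverse ++ (R3.map g).reverse ++ (R4.map g).reverse ++ (R5.map g).reverse ++ (R6.map g).reverse ++ (R7.map g).reverse = (([] : List (Option Char))) ++ (R0.map g).reverse ++ ((R1.map g).reverse ++ (R2.map g).reverse ++ (R3.map g).reverse ++ (R4.map g).reverse ++ (R5.map g).reverse ++ (R6.map g).reverse ++ (R7.map g).reverse) from by
      first | rfl | simp [List.append_assoc]]
    exact h
  have hA1 : pvRankRLE ((PySem.List.enumerate (pvParseLoop bf (List.replicate 64 none) 7 0) 0).foldl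
        pvMirrorStep (List.replicate 64 none)) 1 = pvRLEO ((R1.map g).reverse) := by
    have h := pv_rankRLE_chunk ((R0.map g).reverse) ((R1.map g).reverse)
      ((R2.map g).reverse ++ (R3.map g).reverse ++ (R4.map g).reverse ++ (R5.map g).reverse ++ (R6.map g).reverse ++ (R7.map g).reverse) 1 (by simp only [List.length_append, ml0]) ml1
    rw [show ((1:Nat):Int) = (1:Int) from by norm_num] at h
    rw [hmirM, show (R0.map g).reverse ++ (R1.map g).reverse ++ (R2.map g).reverse ++ (R3.map g).reverse ++ (R4.map g).reverse ++ (R5.map g).reverse ++ (R6.map g).reverse ++ (R7.map g).reverse = ((R0.map g).reverse) ++ (R1.map g).reverse ++ ((R2.map g).reverse ++ (R3.map g).reverse ++ (R4.map g).reverse ++ (R5.map g).reverse ++ (R6.map g).reverse ++ (R7.map g).reverse) from by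
      first | rfl | simp [List.append_assoc]]
    exact h
  have hA2 : pvRankRLE ((PySem.List.enumerate (pvParseLoop bf (List.replicate 64 none) 7 0) 0).foldl
        pvMirrorStep (List.replicate 64 none)) 2 = pvRLEO ((R2.map g).reverse) := by
    have h := pv_rankRLE_chunk ((R0.map g).reverse ++ (R1.map g).reverse) ((R2.map g).reverse)
      ((R3.map g).reverse ++ (R4.map g).reverse ++ (R5.map g).reverse ++ (R6.map g).reverse ++ (R7.map g).reverse) 2 (by simp only [List.length_append, ml0, ml1]) ml2
    rw [show ((2:Nat):Int) = (2:Int) from by norm_num] at h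
    rw [hmirM, show (R0.map g).reverse ++ (R1.map g).reverse ++ (R2.map g).reverse ++ (R3.map g).reverse ++ (R4.map g).reverse ++ (R5.map g).reverse ++ (R6.map g).reverse ++ (R7.map g).reverse = ((R0.map g).reverse ++ (R1.map g).reverse) ++ (R2.map g).reverse ++ ((R3.map g).reverse ++ (R4.map g).reverse ++ (R5.map g).reverse ++ (R6.map g).reverse ++ (R7.map g).reverse) from by
      first | rfl | simp [List.append_assoc]]
    exact h
  have hA3 : pvRankRLE ((PySem.List.enumerate (pvParseLoop bf (List.replicate 64 none) 7 0) 0).foldl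
        pvMirrorStep (List.replicate 64 none)) 3 = pvRLEO ((R3.map g).reverse) := by
    have h := pv_rankRLE_chunk ((R0.map g).reverse ++ (R1.map g).reverse ++ (R2.map g).reverse) ((R3.map g).reverse)
      ((R4.map g).reverse ++ (R5.map g).reverse ++ (R6.map g).reverse ++ (R7.map g).reverse) 3 (by simp only [List.length_append, ml0, ml1, ml2]) ml3
    rw [show ((3:Nat):Int) = (3:Int) from by norm_num] at h
    rw [hmirM, show (R0.map g).reverse ++ (R1.map g).reverse ++ (R2.map g).reverse ++ (R3.map g).reverse ++ (R4.map g).reverse ++ (R5.map g).reverse ++ (R6.map g).reverse ++ (R7.map g).reverse = ((R0.map g).reverse ++ (R1.map g).reverse ++ (R2.map g).reverse) ++ (R3.map g).reverse ++ ((R4.map g).reverse ++ (R5.map g).reverse ++ (R6.map g).reverse ++ (R7.map g).reverse) from by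
      first | rfl | simp [List.append_assoc]]
    exact h
  have hA4 : pvRankRLE ((PySem.List.enumerate (pvParseLoop bf (List.replicate 64 none) 7 0) 0).foldl
        pvMirrorStep (List.replicate 64 none)) 4 = pvRLEO ((R4.map g).reverse) := by
    have h := pv_rankRLE_chunk ((R0.map g).reverse ++ (R1.map g).reverse ++ (R2.map g).reverse ++ (R3.map g).reverse) ((R4.map g).reverse)
      ((R5.map g).reverse ++ (R6.map g).reverse ++ (R7.map g).reverse) 4 (by simp only [List.length_append, ml0, ml1, ml2, ml3]) ml4
    rw [show ((4:Nat):Int) = (4:Int) from by norm_num] at h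
    rw [hmirM, show (R0.map g).reverse ++ (R1.map g).reverse ++ (R2.map g).reverse ++ (R3.map g).reverse ++ (R4.map g).reverse ++ (R5.map g).reverse ++ (R6.map g).reverse ++ (R7.map g).reverse = ((R0.map g).reverse ++ (R1.map g).reverse ++ (R2.map g).reverse ++ (R3.map g).reverse) ++ (R4.map g).reverse ++ ((R5.map g).reverse ++ (R6.map g).reverse ++ (R7.map g).reverse) from by
      first | rfl | simp [List.append_assoc]]
    exact h
  have hA5 : pvRankRLE ((PySem.List.enumerate (pvParseLoop bf (List.replicate 64 none) 7 0) 0).foldl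
        pvMirrorStep (List.replicate 64 none)) 5 = pvRLEO ((R5.map g).reverse) := by
    have h := pv_rankRLE_chunk ((R0.map g).reverse ++ (R1.map g).reverse ++ (R2.map g).reverse ++ (R3.map g).reverse ++ (R4.map g).reverse) ((R5.map g).reverse)
      ((R6.map g).reverse ++ (R7.map g).reverse) 5 (by simp only [List.length_append, ml0, ml1, ml2, ml3, ml4]) ml5
    rw [show ((5:Nat):Int) = (5:Int) from by norm_num] at h
    rw [hmirM, show (R0.map g).reverse ++ (R1.map g).reverse ++ (R2.map g).reverse ++ (R3.map g).reverse ++ (R4.map g).reverse ++ (R5.map g).reverse ++ (R6.map g).reverse ++ (R7.map g).reverse = ((R0.map g).reverse ++ (R1.map g).reverse ++ (R2.map g).reverse ++ (R3.map g).reverse ++ (R4.map g).reverse) ++ (R5.map g).reverse ++ ((R6.map g).reverse ++ (R7.map g).reverse) from by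
      first | rfl | simp [List.append_assoc]]
    exact h
  have hA6 : pvRankRLE ((PySem.List.enumerate (pvParseLoop bf (List.replicate 64 none) 7 0) 0).foldl
        pvMirrorStep (List.replicate 64 none)) 6 = pvRLEO ((R6.map g).reverse) := by
    have h := pv_rankRLE_chunk ((R0.map g).reverse ++ (R1.map g).reverse ++ (R2.map g).reverse ++ (R3.map g).reverse ++ (R4.map g).reverse ++ (R5.map g).reverse) ((R6.map g).reverse)
      ((R7.map g).reverse) 6 (by simp only [List.length_append, ml0, ml1, ml2, ml3, ml4, ml5]) ml6
    rw [show ((6:Nat):Int) = (6:Int) from by norm_num] at h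
    rw [hmirM, show (R0.map g).reverse ++ (R1.map g).reverse ++ (R2.map g).reverse ++ (R3.map g).reverse ++ (R4.map g).reverse ++ (R5.map g).reverse ++ (R6.map g).reverse ++ (R7.map g).reverse = ((R0.map g).reverse ++ (R1.map g).reverse ++ (R2.map g).reverse ++ (R3.map g).reverse ++ (R4.map g).reverse ++ (R5.map g).reverse) ++ (R6.map g).reverse ++ ((R7.map g).reverse) from by
      first | rfl | simp [List.append_assoc]]
    exact h
  have hA7 : pvRankRLE ((PySem.List.enumerate (pvParseLoop bf (List.replicate 64 none) 7 0) 0).foldl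
        pvMirrorStep (List.replicate 64 none)) 7 = pvRLEO ((R7.map g).reverse) := by
    have h := pv_rankRLE_chunk ((R0.map g).reverse ++ (R1.map g).reverse ++ (R2.map g).reverse ++ (R3.map g).reverse ++ (R4.map g).reverse ++ (R5.map g).reverse ++ (R6.map g).reverse) ((R7.map g).reverse)
      (([] : List (Option Char))) 7 (by simp only [List.length_append, ml0, ml1, ml2, ml3, ml4, ml5, ml6]) ml7
    rw [show ((7:Nat):Int) = (7:Int) from by norm_num] at h
    rw [hmirM, show (R0.map g).reverse ++ (R1.map g).reverse ++ (R2.map g).reverse ++ (R3.map g).reverse ++ (R4.map g).reverse ++ (R5.map g).reverse ++ (R6.map g).reverse ++ (R7.map g).reverse = ((R0.map g).reverse ++ (R1.map g).reverse ++ (R2.map g).reverse ++ (R3.map g).reverse ++ (R4.map g).reverse ++ (R5.map g).reverse ++ (R6.map g).reverse) ++ (R7.map g).reverse ++ (([] : List (Option Char))) from by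
      first | rfl | simp [List.append_assoc]]
    exact h
  have hS0 : PySem.List.slice ((pvLjust (ranks.flatMap (fun r => pvLjust (pvExpandRank r) 8)) 64).reverse.map
        pvSwapChar) (some (0:Int)) (some ((0:Int) + 8))
      = ((cf R7).map pvSwapChar).reverse := by
    have h := pv_slice_chunk (([] : List Char)) (((cf R7).map pvSwapChar).reverse)
      (((cf R6).map pvSwapChar).reverse ++ ((cf R5).map pvSwapChar).reverse ++ ((cf R4).map pvSwapChar).reverse ++ ((cf R3).map pvSwapChar).reverse ++ ((cf R2).map pvSwapChar).reverse ++ ((cf R1).map pvSwapChar).reverse ++ ((cf R0).map pvSwapChar).reverse) 0 (by norm_num) (by simp) nl7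
    rw [hflip, show ((cf R7).map pvSwapChar).reverse ++ ((cf R6).map pvSwapChar).reverse ++ ((cf R5).map pvSwapChar).reverse ++ ((cf R4).map pvSwapChar).reverse ++ ((cf R3).map pvSwapChar).reverse ++ ((cf R2).map pvSwapChar).reverse ++ ((cf R1).map pvSwapChar).reverse ++ ((cf R0).map pvSwapChar).reverse = (([] : List Char)) ++ ((cf R7).map pvSwapChar).reverse ++ (((cf R6).map pvSwapChar).reverse ++ ((cf R5).map pvSwapChar).reverse ++ ((cf R4).map pvSwapChar).reverse ++ ((cf R3).map pvSwapChar).reverse ++ ((cf R2).map pvSwapChar).reverse ++ ((cf R1).map pvSwapChar).reverse ++ ((cf R0).map pvSwapChar).reverse) from by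
      first | rfl | simp [List.append_assoc]]
    exact h
  have hS1 : PySem.List.slice ((pvLjust (ranks.flatMap (fun r => pvLjust (pvExpandRank r) 8)) 64).reverse.map
        pvSwapChar) (some (8:Int)) (some ((8:Int) + 8))
      = ((cf R6).map pvSwapChar).reverse := by
    have h := pv_slice_chunk (((cf R7).map pvSwapChar).reverse) (((cf R6).map pvSwapChar).reverse)
      (((cf R5).map pvSwapChar).reverse ++ ((cf R4).map pvSwapChar).reverse ++ ((cf R3).map pvSwapChar).reverse ++ ((cf R2).map pvSwapChar).reverse ++ ((cf R1).map pvSwapChar).reverse ++ ((cf R0).map pvSwapChar).reverse) 8 (by norm_num) (by simp only [List.length_append, nl7]; decide) nl6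
    rw [hflip, show ((cf R7).map pvSwapChar).reverse ++ ((cf R6).map pvSwapChar).reverse ++ ((cf R5).map pvSwapChar).reverse ++ ((cf R4).map pvSwapChar).reverse ++ ((cf R3).map pvSwapChar).reverse ++ ((cf R2).map pvSwapChar).reverse ++ ((cf R1).map pvSwapChar).reverse ++ ((cf R0).map pvSwapChar).reverse = (((cf R7).map pvSwapChar).reverse) ++ ((cf R6).map pvSwapChar).reverse ++ (((cf R5).map pvSwapChar).reverse ++ ((cf R4).map pvSwapChar).reverse ++ ((cf R3).map pvSwapChar).reverse ++ ((cf R2).map pvSwapChar).reverse ++ ((cf R1).map pvSwapChar).reverse ++ ((cf R0).map pvSwapChar).reverse) from by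
      first | rfl | simp [List.append_assoc]]
    exact h
  have hS2 : PySem.List.slice ((pvLjust (ranks.flatMap (fun r => pvLjust (pvExpandRank r) 8)) 64).reverse.map
        pvSwapChar) (some (16:Int)) (some ((16:Int) + 8))
      = ((cf R5).map pvSwapChar).reverse := by
    have h := pv_slice_chunk (((cf R7).map pvSwapChar).reverse ++ ((cf R6).map pvSwapChar).reverse) (((cf R5).map pvSwapChar).reverse)
      (((cf R4).map pvSwapChar).reverse ++ ((cf R3).map pvSwapChar).reverse ++ ((cf R2).map pvSwapChar).reverse ++ ((cf R1).map pvSwapChar).reverse ++ ((cf R0).map pvSwapChar).reverse) 16 (by norm_num) (by simp only [List.length_append, nl7, nl6]; decide) nl5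
    rw [hflip, show ((cf R7).map pvSwapChar).reverse ++ ((cf R6).map pvSwapChar).reverse ++ ((cf R5).map pvSwapChar).reverse ++ ((cf R4).map pvSwapChar).reverse ++ ((cf R3).map pvSwapChar).reverse ++ ((cf R2).map pvSwapChar).reverse ++ ((cf R1).map pvSwapChar).reverse ++ ((cf R0).map pvSwapChar).reverse = (((cf R7).map pvSwapChar).reverse ++ ((cf R6).map pvSwapChar).reverse) ++ ((cf R5).map pvSwapChar).reverse ++ (((cf R4).map pvSwapChar).reverse ++ ((cf R3).map pvSwapChar).reverse ++ ((cf R2).map pvSwapChar).reverse ++ ((cf R1).map pvSwapChar).reverse ++ ((cf R0).map pvSwapChar).reverse) from by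
      first | rfl | simp [List.append_assoc]]
    exact h
  have hS3 : PySem.List.slice ((pvLjust (ranks.flatMap (fun r => pvLjust (pvExpandRank r) 8)) 64).reverse.map
        pvSwapChar) (some (24:Int)) (some ((24:Int) + 8))
      = ((cf R4).map pvSwapChar).reverse := by
    have h := pv_slice_chunk (((cf R7).map pvSwapChar).reverse ++ ((cf R6).map pvSwapChar).reverse ++ ((cf R5).map pvSwapChar).reverse) (((cf R4).map pvSwapChar).reverse)
      (((cf R3).map pvSwapChar).reverse ++ ((cf R2).map pvSwapChar).reverse ++ ((cf R1).map pvSwapChar).reverse ++ ((cf R0).map pvSwapChar).reverse) 24 (by norm_num) (by simp only [List.length_append, nl7, nl6, nl5]; decide) nl4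
    rw [hflip, show ((cf R7).map pvSwapChar).reverse ++ ((cf R6).map pvSwapChar).reverse ++ ((cf R5).map pvSwapChar).reverse ++ ((cf R4).map pvSwapChar).reverse ++ ((cf R3).map pvSwapChar).reverse ++ ((cf R2).map pvSwapChar).reverse ++ ((cf R1).map pvSwapChar).reverse ++ ((cf R0).map pvSwapChar).reverse = (((cf R7).map pvSwapChar).reverse ++ ((cf R6).map pvSwapChar).reverse ++ ((cf R5).map pvSwapChar).reverse) ++ ((cf R4).map pvSwapChar).reverse ++ (((cf R3).map pvSwapChar).reverse ++ ((cf R2).map pvSwapChar).reverse ++ ((cf R1).map pvSwapChar).reverse ++ ((cf R0).map pvSwapChar).reverse) from by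
      first | rfl | simp [List.append_assoc]]
    exact h
  have hS4 : PySem.List.slice ((pvLjust (ranks.flatMap (fun r => pvLjust (pvExpandRank r) 8)) 64).reverse.map
        pvSwapChar) (some (32:Int)) (some ((32:Int) + 8))
      = ((cf R3).map pvSwapChar).reverse := by
    have h := pv_slice_chunk (((cf R7).map pvSwapChar).reverse ++ ((cf R6).map pvSwapChar).reverse ++ ((cf R5).map pvSwapChar).reverse ++ ((cf R4).map pvSwapChar).reverse) (((cf R3).map pvSwapChar).reverse)
      (((cf R2).map pvSwapChar).reverse ++ ((cf R1).map pvSwapChar).reverse ++ ((cf R0).map pvSwapChar).reverse) 32 (by norm_num) (by simp only [List.length_append, nl7, nl6, nl5, nl4]; decide) nl3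
    rw [hflip, show ((cf R7).map pvSwapChar).reverse ++ ((cf R6).map pvSwapChar).reverse ++ ((cf R5).map pvSwapChar).reverse ++ ((cf R4).map pvSwapChar).reverse ++ ((cf R3).map pvSwapChar).reverse ++ ((cf R2).map pvSwapChar).reverse ++ ((cf R1).map pvSwapChar).reverse ++ ((cf R0).map pvSwapChar).reverse = (((cf R7).map pvSwapChar).reverse ++ ((cf R6).map pvSwapChar).reverse ++ ((cf R5).map pvSwapChar).reverse ++ ((cf R4).map pvSwapChar).reverse) ++ ((cf R3).map pvSwapChar).reverse ++ (((cf R2).map pvSwapChar).reverse ++ ((cf R1).map pvSwapChar).reverse ++ ((cf R0).map pvSwapChar).reverse) from by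
      first | rfl | simp [List.append_assoc]]
    exact h
  have hS5 : PySem.List.slice ((pvLjust (ranks.flatMap (fun r => pvLjust (pvExpandRank r) 8)) 64).reverse.map
        pvSwapChar) (some (40:Int)) (some ((40:Int) + 8))
      = ((cf R2).map pvSwapChar).reverse := by
    have h := pv_slice_chunk (((cf R7).map pvSwapChar).reverse ++ ((cf R6).map pvSwapChar).reverse ++ ((cf R5).map pvSwapChar).reverse ++ ((cf R4).map pvSwapChar).reverse ++ ((cf R3).map pvSwapChar).reverse) (((cf R2).map pvSwapChar).reverse)
      (((cf R1).map pvSwapChar).reverse ++ ((cf R0).map pvSwapChar).reverse) 40 (by norm_num) (by simp only [List.length_append, nl7, nl6, nl5, nl4, nl3]; decide) nl2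
    rw [hflip, show ((cf R7).map pvSwapChar).reverse ++ ((cf R6).map pvSwapChar).reverse ++ ((cf R5).map pvSwapChar).reverse ++ ((cf R4).map pvSwapChar).reverse ++ ((cf R3).map pvSwapChar).reverse ++ ((cf R2).map pvSwapChar).reverse ++ ((cf R1).map pvSwapChar).reverse ++ ((cf R0).map pvSwapChar).reverse = (((cf R7).map pvSwapChar).reverse ++ ((cf R6).map pvSwapChar).reverse ++ ((cf R5).map pvSwapChar).reverse ++ ((cf R4).map pvSwapChar).reverse ++ ((cf R3).map pvSwapChar).reverse) ++ ((cf R2).map pvSwapChar).reverse ++ (((cf R1).map pvSwapChar).reverse ++ ((cf R0).map pvSwapChar).reverse) from by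
      first | rfl | simp [List.append_assoc]]
    exact h
  have hS6 : PySem.List.slice ((pvLjust (ranks.flatMap (fun r => pvLjust (pvExpandRank r) 8)) 64).reverse.map
        pvSwapChar) (some (48:Int)) (some ((48:Int) + 8))
      = ((cf R1).map pvSwapChar).reverse := by
    have h := pv_slice_chunk (((cf R7).map pvSwapChar).reverse ++ ((cf R6).map pvSwapChar).reverse ++ ((cf R5).map pvSwapChar).reverse ++ ((cf R4).map pvSwapChar).reverse ++ ((cf R3).map pvSwapChar).reverse ++ ((cf R2).map pvSwapChar).reverse) (((cf R1).map pvSwapChar).reverse)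
      (((cf R0).map pvSwapChar).reverse) 48 (by norm_num) (by simp only [List.length_append, nl7, nl6, nl5, nl4, nl3, nl2]; decide) nl1
    rw [hflip, show ((cf R7).map pvSwapChar).reverse ++ ((cf R6).map pvSwapChar).reverse ++ ((cf R5).map pvSwapChar).reverse ++ ((cf R4).map pvSwapChar).reverse ++ ((cf R3).map pvSwapChar).reverse ++ ((cf R2).map pvSwapChar).reverse ++ ((cf R1).map pvSwapChar).reverse ++ ((cf R0).map pvSwapChar).reverse = (((cf R7).map pvSwapChar).reverse ++ ((cf R6).map pvSwapChar).reverse ++ ((cf R5).map pvSwapChar).reverse ++ ((cf R4).map pvSwapChar).reverse ++ ((cf R3).map pvSwapChar).reverse ++ ((cf R2).map pvSwapChar).reverse) ++ ((cf R1).map pvSwapChar).reverse ++ (((cf R0).map pvSwapChar).reverse) from by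
      first | rfl | simp [List.append_assoc]]
    exact h
  have hS7 : PySem.List.slice ((pvLjust (ranks.flatMap (fun r => pvLjust (pvExpandRank r) 8)) 64).reverse.map
        pvSwapChar) (some (56:Int)) (some ((56:Int) + 8))
      = ((cf R0).map pvSwapChar).reverse := by
    have h := pv_slice_chunk (((cf R7).map pvSwapChar).reverse ++ ((cf R6).map pvSwapChar).reverse ++ ((cf R5).map pvSwapChar).reverse ++ ((cf R4).map pvSwapChar).reverse ++ ((cf R3).map pvSwapChar).reverse ++ ((cf R2).map pvSwapChar).reverse ++ ((cf R1).map pvSwapChar).reverse) (((cf R0).map pvSwapChar).reverse)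
      (([] : List Char)) 56 (by norm_num) (by simp only [List.length_append, nl7, nl6, nl5, nl4, nl3, nl2, nl1]; decide) nl0
    rw [hflip, show ((cf R7).map pvSwapChar).reverse ++ ((cf R6).map pvSwapChar).reverse ++ ((cf R5).map pvSwapChar).reverse ++ ((cf R4).map pvSwapChar).reverse ++ ((cf R3).map pvSwapChar).reverse ++ ((cf R2).map pvSwapChar).reverse ++ ((cf R1).map pvSwapChar).reverse ++ ((cf R0).map pvSwapChar).reverse = (((cf R7).map pvSwapChar).reverse ++ ((cf R6).map pvSwapChar).reverse ++ ((cf R5).map pvSwapChar).reverse ++ ((cf R4).map pvSwapChar).reverse ++ ((cf R3).map pvSwapChar).reverse ++ ((cf R2).map pvSwapChar).reverse ++ ((cf R1).map pvSwapChar).reverse) ++ ((cf R0).map pvSwapChar).reverse ++ (([] : List Char)) from by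
      first | rfl | simp [List.append_assoc]]
    exact h
  rw [show PySem.List.pyRange 7 (-1) (-1) = [7,6,5,4,3,2,1,0] from by decide,
    show PySem.List.pyRange 0 64 8 = [0,8,16,24,32,40,48,56] from by decide,
    PySem.List.foldl_append_singleton_eq_map, PySem.List.foldl_append_singleton_eq_map]
  simp only [List.map_cons, List.map_nil, List.nil_append]
  rw [hA7, hA6, hA5, hA4, hA3, hA2, hA1, hA0]
  rw [hS0, hS1, hS2, hS3, hS4, hS5, hS6, hS7]
  rw [hg, hcf]
  rw [pv_row_corr R7 (hRpieces R7 (by rw [hRs]; simp)),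
    pv_row_corr R6 (hRpieces R6 (by rw [hRs]; simp)),
    pv_row_corr R5 (hRpieces R5 (by rw [hRs]; simp)),
    pv_row_corr R4 (hRpieces R4 (by rw [hRs]; simp)),
    pv_row_corr R3 (hRpieces R3 (by rw [hRs]; simp)),
    pv_row_corr R2 (hRpieces R2 (by rw [hRs]; simp)),
    pv_row_corr R1 (hRpieces R1 (by rw [hRs]; simp)),
    pv_row_corr R0 (hRpieces R0 (by rw [hRs]; simp))]


-- ===== VERDICT (by name: the statement is the Claim_ definition above) =====
theorem mirror_fen_spec : Claim_equal_mirror_fen := by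
  intro fen hdom hpre
  unfold Spec_mirror_fen
  unfold Pre_mirror_fen at hpre
  simp only at hpre
  obtain ⟨hp4, hL, hw⟩ := hpre
  rw [pv_splitOn_eq] at hL hw
  have hch : ∀ c ∈ (PySem.List.pyGetD (PySem.Str.split₀ fen) 0 "").toList, pvSwapChar c ≠ ' ' := by
    have hmem : PySem.List.pyGetD (PySem.Str.split₀ fen) 0 "" ∈ PySem.Str.split₀ fen :=
      PySem.List.pyGetD_mem _ _ ⟨by omega, by omega⟩
    have hbl : (PySem.List.pyGetD (PySem.Str.split₀ fen) 0 "").toList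
        ∈ List.map String.toList (PySem.Str.split₀ fen) := List.mem_map_of_mem hmem
    rw [PySem.Str.split₀_map_toList] at hbl
    intro c hc
    have h2 := pv_split0_chars hbl hc
    have hd : pvDomChar c = true := by
      unfold Dom_mirror_fen pvDomStr at hdom
      rw [List.all_eq_true] at hdom
      exact hdom c h2.1
    exact pv_swap_ne_space hd h2.2
  have hrows := pv_rows_eq (PySem.List.pyGetD (PySem.Str.split₀ fen) 0 "").toList hch hL hw
  unfold mirror_fen mirror_fen_alt
  simp only
  have h4 : ¬ ((PySem.Str.split₀ fen).length < 4) := by omega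
  rw [if_neg h4, if_neg h4, hrows]
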